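-- pv_equiv track=rewrite | github.com/Sand128/proyectosGitHubSand | cambiarMayusculas.py | reemplazo
-- ===== SOURCE A (Python) =====
-- def reemplazo(string):
--     mayusculas = 'ABCDEFGHIJKLMNOPQRSTUVWXYZ'
--     palabra = ""
--     for letra in string:
--         if letra in mayusculas:
--             palabra = palabra + "$"
--         else:
--             palabra = palabra + letra
--     return palabra
-- ===== SOURCE B (Python) =====
-- def reemplazo(string):
--     for letra in 'ABCDEFGHIJKLMNOPQRSTUVWXYZ':
--         string = string.replace(letra, '$')
--     return string
-- ===== Notes on version B (the rewrite author's own statement) =====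
-- stated objective: alternative
-- what changed: Instead of one per-character loop with a membership test and incremental string concatenation, B makes 26 whole-string str.replace passes, one per uppercase letter, carrying the string itself as the accumulator; measured faster because each pass runs in C and avoids quadratic concatenation.
import Mathlib
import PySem

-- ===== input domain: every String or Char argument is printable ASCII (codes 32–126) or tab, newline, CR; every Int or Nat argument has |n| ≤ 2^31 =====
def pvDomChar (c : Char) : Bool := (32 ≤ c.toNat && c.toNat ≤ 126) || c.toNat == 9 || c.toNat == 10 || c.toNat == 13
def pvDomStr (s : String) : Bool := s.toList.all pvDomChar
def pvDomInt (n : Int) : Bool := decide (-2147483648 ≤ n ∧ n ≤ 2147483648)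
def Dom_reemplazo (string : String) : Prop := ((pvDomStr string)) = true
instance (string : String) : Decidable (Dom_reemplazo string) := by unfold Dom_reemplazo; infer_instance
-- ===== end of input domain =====

-- B replaces A's single per-character loop-and-branch by 26 whole-string replace passes, one per uppercase letter (alternative decomposition).

-- ===== PORT A =====
-- literal transliteration: accumulate the output string character by character
def reemplazo (string : String) : String :=
  let mayusculas := "ABCDEFGHIJKLMNOPQRSTUVWXYZ"
  let palabra : List Char :=
    string.toList.foldl
      (fun palabra letra =>
        if mayusculas.toList.contains letra then palabra ++ ['$'] else palabra ++ [letra])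
      []
  String.ofList palabra

-- ===== PORT B =====
-- for each uppercase letter, one whole-string replace pass; the string is the accumulator
def reemplazo_alt (string : String) : String :=
  "ABCDEFGHIJKLMNOPQRSTUVWXYZ".toList.foldl
    (fun s letra => PySem.Str.replace s (String.ofList [letra]) "$") string

-- ===== PRECONDITION & SPEC =====
def Spec_reemplazo (string : String) (out : String) : Prop := out = reemplazo_alt string
instance (string : String) (out : String) : Decidable (Spec_reemplazo string out) := by unfold Spec_reemplazo; infer_instance

-- ===== CLAIM =====
def Claim_equal_reemplazo : Prop := ∀ (string : String), Dom_reemplazo string → Spec_reemplazo string (reemplazo string)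

-- ===== LEMMAS AND PROOFS =====

-- replace's worker on a single-char pattern is a map, given enough fuel
theorem replace_go_single (a b : Char) (fuel : Nat) :
    ∀ (l acc : List Char), l.length ≤ fuel →
      PySem.Chars.replace.go [a] [b] fuel l acc
        = acc.reverse ++ l.map (fun c => if c = a then b else c) := by
  induction fuel with
  | zero =>
    intro l acc h
    have : l = [] := List.eq_nil_of_length_eq_zero (Nat.le_zero.mp h)
    subst this; simp [PySem.Chars.replace.go]
  | succ n ih =>
    intro l acc h
    cases l with
    | nil => simp [PySem.Chars.replace.go]
    | cons c t =>
      have ht : t.length ≤ n := by simpa using h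
      by_cases hc : c = a
      · subst hc
        have hp : List.isPrefixOf [c] (c :: t) = true := by
          simp [List.isPrefixOf]
        simp only [PySem.Chars.replace.go, hp, if_true]
        rw [show List.drop ([c].length) (c :: t) = t from by simp]
        rw [ih t ([b].reverse ++ acc) ht]
        simp
      · have hp : List.isPrefixOf [a] (c :: t) = false := by
          simp [List.isPrefixOf]; exact fun e => hc e.symm
        simp only [PySem.Chars.replace.go, hp, Bool.false_eq_true, if_false]
        rw [ih t (c :: acc) ht]
        simp [hc]

-- replace with a single-char pattern is a character map
theorem replace_single (a b : Char) (l : List Char) :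
    PySem.Chars.replace l [a] [b] = l.map (fun c => if c = a then b else c) := by
  unfold PySem.Chars.replace
  rw [if_neg (by simp)]
  rw [replace_go_single a b l.length l [] le_rfl]
  simp

-- folding replace passes over a letter list is one map with a membership test
theorem fold_replace_eq_map (L : List Char) (l : List Char) :
    L.foldl (fun s a => s.map (fun c => if c = a then '$' else c)) l
      = l.map (fun c => if c ∈ L then '$' else c) := by
  induction L generalizing l with
  | nil => simp
  | cons a L ih =>
    rw [List.foldl_cons, ih, List.map_map]
    apply List.map_congr_left
    intro c _
    by_cases hc : c = a
    · subst hc; simp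
    · by_cases hm : c ∈ L <;> simp [Function.comp, hc, hm]

-- B's string-level fold, pushed to lists
theorem alt_toList (L : List Char) (s : String) :
    (L.foldl (fun s a => PySem.Str.replace s (String.ofList [a]) "$") s).toList
      = L.foldl (fun cs a => PySem.Chars.replace cs [a] ['$']) s.toList := by
  induction L generalizing s with
  | nil => rfl
  | cons a L ih =>
    rw [List.foldl_cons, List.foldl_cons, ih, PySem.Str.toList_replace,
      String.toList_ofList, show "$".toList = ['$'] from by decide]

-- A's accumulating loop is a map
theorem reemplazo_foldl_eq (l acc : List Char) :
    l.foldl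
      (fun palabra letra =>
        if ("ABCDEFGHIJKLMNOPQRSTUVWXYZ".toList.contains letra) then palabra ++ ['$'] else palabra ++ [letra])
      acc
    = acc ++ l.map (fun c => if ("ABCDEFGHIJKLMNOPQRSTUVWXYZ".toList.contains c) then '$' else c) := by
  induction l generalizing acc with
  | nil => simp
  | cons x xs ih =>
    rw [List.foldl_cons, List.map_cons, ih]
    by_cases h : ("ABCDEFGHIJKLMNOPQRSTUVWXYZ".toList.contains x) = true
    · rw [if_pos h, if_pos h, List.append_assoc]; rfl
    · rw [if_neg h, if_neg h, List.append_assoc]; rfl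

-- ===== VERDICT =====
theorem reemplazo_spec : Claim_equal_reemplazo := by
  intro s _
  unfold Spec_reemplazo reemplazo reemplazo_alt
  simp only []
  rw [reemplazo_foldl_eq, List.nil_append]
  apply String.ext  -- equal underlying lists
  show _ = (("ABCDEFGHIJKLMNOPQRSTUVWXYZ".toList.foldl
      (fun s letra => PySem.Str.replace s (String.ofList [letra]) "$") s)).toList
  rw [alt_toList]
  have : ∀ l : List Char,
      ("ABCDEFGHIJKLMNOPQRSTUVWXYZ".toList.foldl (fun cs a => PySem.Chars.replace cs [a] ['$']) l)
        = "ABCDEFGHIJKLMNOPQRSTUVWXYZ".toList.foldl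
            (fun cs a => cs.map (fun c => if c = a then '$' else c)) l := by
    intro l
    induction ("ABCDEFGHIJKLMNOPQRSTUVWXYZ".toList) generalizing l with
    | nil => rfl
    | cons a L ih2 => rw [List.foldl_cons, List.foldl_cons, replace_single, ih2]
  rw [this, fold_replace_eq_map]
  rw [String.toList_ofList]
  apply List.map_congr_left
  intro c _
  by_cases h : c ∈ "ABCDEFGHIJKLMNOPQRSTUVWXYZ".toList <;> simp_all
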